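-- pv_equiv track=rewrite | github.com/teju85/programming | rosalind/common.py | readFastaFromString
-- ===== SOURCE A (Python) =====
-- def stripLine(line):
--     line = line.strip('\n')
--     line = line.strip('\r')
--     return line
--
-- def readFastaFromString(lines):
--     label = ''
--     dna = ''
--     data = []
--     for line in lines:
--         line = stripLine(line)
--         if len(line) <= 0:
--             continue
--         if line[0] == '>':
--             if label != '' and dna != '':
--                 data.append((label, dna))
--             label = line[1:]
--             dna = ''
--             continue
--         dna += line
--     if label != '' and dna != '':
--         data.append((label, dna))
--     return data
-- ===== SOURCE B (Python) =====
-- def _cleanLine(line):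
--     line = line.strip('\n')
--     line = line.strip('\r')
--     return line
--
--
-- def _parseRecords(ls):
--     # ls: cleaned, non-empty lines.  Returns [(label, [fragment lines])].
--     recs = []
--     i = 0
--     while i < len(ls):
--         if ls[i].startswith('>'):
--             j = i + 1
--             while j < len(ls) and not ls[j].startswith('>'):
--                 j += 1
--             recs.append((ls[i][1:], ls[i + 1:j]))
--             i = j
--         else:
--             i += 1
--     return recs
--
--
-- def readFastaFromString(lines):
--     cleaned = [c for c in (_cleanLine(l) for l in lines) if c != '']
--     return [(lab, ''.join(fr)) for lab, fr in _parseRecords(cleaned)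
--             if lab != '' and ''.join(fr) != '']
-- ===== Notes on version B (the rewrite author's own statement) =====
-- stated objective: alternative
-- what changed: Replaced A's single loop rolling label/dna scalars and flushing on each header with a two-phase design: clean and drop blank lines, recursively split the lines into (label, fragment-list) records at headers, then join and filter the records in one comprehension.
import Mathlib
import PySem

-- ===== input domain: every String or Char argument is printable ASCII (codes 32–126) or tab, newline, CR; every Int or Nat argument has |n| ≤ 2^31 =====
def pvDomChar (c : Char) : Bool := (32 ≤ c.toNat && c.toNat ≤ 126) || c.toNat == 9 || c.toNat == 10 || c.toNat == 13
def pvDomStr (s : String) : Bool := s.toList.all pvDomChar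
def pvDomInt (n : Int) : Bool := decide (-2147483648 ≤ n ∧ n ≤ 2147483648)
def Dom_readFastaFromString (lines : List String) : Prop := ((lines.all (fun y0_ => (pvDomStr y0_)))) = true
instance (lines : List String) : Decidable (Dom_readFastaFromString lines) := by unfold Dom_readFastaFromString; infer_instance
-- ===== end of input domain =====

-- B restructures A's single rolling-scalar loop into clean → recursive record split → join/filter; same values, no speed claim.

-- ===== PORT A =====
def stripLine (line : String) : String :=
  PySem.Str.stripChars (PySem.Str.stripChars line "\n") "\r"

def readFastaLoop : List String → String → String → List (String × String) → List (String × String)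
  | [], label, dna, data =>
      if label ≠ "" ∧ dna ≠ "" then data ++ [(label, dna)] else data
  | l :: rest, label, dna, data =>
      let line := stripLine l
      if PySem.Str.len line ≤ 0 then readFastaLoop rest label dna data
      else if PySem.Str.pyGet? line 0 = some '>' then
        readFastaLoop rest (PySem.Str.slice line (some 1) none) ""
          (if label ≠ "" ∧ dna ≠ "" then data ++ [(label, dna)] else data)
      else readFastaLoop rest label (dna ++ line) data

def readFastaFromString (lines : List String) : List (String × String) :=
  readFastaLoop lines "" "" []

-- ===== PORT B =====
def cleanLineB (line : String) : String :=
  PySem.Str.stripChars (PySem.Str.stripChars line "\n") "\r"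

def isHeaderB (s : String) : Bool := PySem.Str.startswith s ">"

def parseRecords : List String → List (String × List String)
  | [] => []
  | head :: rest =>
      if isHeaderB head then
        (PySem.Str.slice head (some 1) none, rest.takeWhile (fun s => !isHeaderB s))
          :: parseRecords (rest.dropWhile (fun s => !isHeaderB s))
      else parseRecords rest
termination_by ls => ls.length
decreasing_by
  · exact Nat.lt_succ_of_le (List.length_dropWhile_le _ _)
  · exact Nat.lt_succ_of_le (Nat.le_refl _)

def readFastaFromString_alt (lines : List String) : List (String × String) :=
  let cleaned := (lines.map cleanLineB).filter (fun c => c ≠ "")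
  (parseRecords cleaned).filterMap (fun r =>
    if r.1 ≠ "" ∧ PySem.Str.join "" r.2 ≠ "" then some (r.1, PySem.Str.join "" r.2) else none)

-- ===== PRECONDITION & SPEC =====
def Spec_readFastaFromString (lines : List String) (out : List (String × String)) : Prop := out = readFastaFromString_alt lines
instance (lines : List String) (out : List (String × String)) : Decidable (Spec_readFastaFromString lines out) := by unfold Spec_readFastaFromString; infer_instance

-- ===== CLAIM (what is proved, stated in full; the proofs are below) =====
def Claim_equal_readFastaFromString : Prop := ∀ (lines : List String), Dom_readFastaFromString lines → Spec_readFastaFromString lines (readFastaFromString lines)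

-- ===== LEMMAS AND PROOFS =====

/-- conditional one-record emission, the shape of A's `data.append`. -/
def emitRec (label dna : String) : List (String × String) :=
  if label ≠ "" ∧ dna ≠ "" then [(label, dna)] else []

/-- plain left-to-right concatenation of strings. -/
def strConcat : List String → String
  | [] => ""
  | x :: xs => x ++ strConcat xs

/-- the filter/join comprehension of B, as a function of the record list. -/
def filtJoin (recs : List (String × List String)) : List (String × String) :=
  recs.filterMap (fun r =>
    if r.1 ≠ "" ∧ PySem.Str.join "" r.2 ≠ "" then some (r.1, PySem.Str.join "" r.2) else none)

theorem filtJoin_cons (r : String × List String) (rs : List (String × List String)) :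
    filtJoin (r :: rs) = emitRec r.1 (PySem.Str.join "" r.2) ++ filtJoin rs := by
  simp only [filtJoin, emitRec, List.filterMap_cons]
  split <;> simp_all

theorem join_empty_eq_strConcat (xs : List String) :
    PySem.Str.join "" xs = strConcat xs := by
  induction xs with
  | nil =>
      rw [← String.toList_inj, PySem.Str.toList_join]
      simp [PySem.Chars.join_nil, strConcat]
  | cons x xs ih =>
      cases xs with
      | nil =>
          rw [← String.toList_inj, PySem.Str.toList_join]
          simp [PySem.Chars.join_singleton, strConcat]
      | cons y ys =>
          rw [← String.toList_inj] at ih ⊢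
          rw [PySem.Str.toList_join] at ih ⊢
          simp only [List.map_cons, PySem.Chars.join_cons_cons] at ih ⊢
          simp only [strConcat, String.toList_append]
          simp only [show ("" : String).toList = [] from rfl] at ih ⊢
          simp only [ih]
          simp [strConcat]

theorem len_le_zero_iff (s : String) : PySem.Str.len s ≤ 0 ↔ s = "" := by
  rw [PySem.Str.len_eq, ← String.toList_eq_nil_iff, ← List.length_eq_zero_iff]
  omega

theorem header_iff (s : String) (h : s ≠ "") :
    PySem.Str.pyGet? s 0 = some '>' ↔ isHeaderB s = true := by
  rw [isHeaderB, PySem.Str.startswith_eq, PySem.Chars.startswith_iff,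
    PySem.Str.pyGet?_eq, PySem.Chars.pyGet?_eq_listPyGet?, PySem.List.pyGet?_zero]
  rcases hs : s.toList with _ | ⟨c, t⟩
  · exact absurd (String.toList_eq_nil_iff.mp hs) h
  · constructor
    · intro hc; simp at hc; simp [hc]
    · intro hp
      have hcg : '>' = c := by simpa using hp
      simp [← hcg]

theorem parse_dropWhile (cs : List String) :
    parseRecords (cs.dropWhile (fun s => !isHeaderB s)) = parseRecords cs := by
  induction cs with
  | nil => rfl
  | cons c cs ih =>
      by_cases hh : isHeaderB c
      · simp [hh]
      · rw [List.dropWhile_cons]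
        simp only [hh, Bool.not_false, if_pos]
        rw [ih]
        conv_rhs => rw [parseRecords]
        simp [hh]

theorem main_invariant (ls : List String) :
    ∀ (label dna : String) (data : List (String × String)),
    readFastaLoop ls label dna data =
      data
        ++ emitRec label (dna ++ strConcat (((ls.map cleanLineB).filter (fun c => c ≠ "")).takeWhile (fun s => !isHeaderB s)))
        ++ filtJoin (parseRecords ((ls.map cleanLineB).filter (fun c => c ≠ ""))):= by
  induction ls with
  | nil =>
      intro label dna data
      simp [readFastaLoop, strConcat, parseRecords, filtJoin, emitRec]
      split <;> simp
  | cons l ls ih =>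
      intro label dna data
      have hstrip : stripLine l = cleanLineB l := rfl
      rw [readFastaLoop]
      simp only [hstrip, List.map_cons, List.filter_cons]
      by_cases hc : cleanLineB l = ""
      · rw [if_pos ((len_le_zero_iff _).mpr hc)]
        simp only [hc, ne_eq, not_true_eq_false, decide_false, if_neg Bool.false_ne_true]
        exact ih label dna data
      · rw [if_neg (fun hle => hc ((len_le_zero_iff _).mp hle))]
        simp only [ne_eq, hc, not_false_eq_true, decide_true, if_pos]
        by_cases hh : isHeaderB (cleanLineB l) = true
        · rw [if_pos ((header_iff _ hc).mpr hh), ih]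
          conv_rhs => rw [parseRecords]
          rw [if_pos hh, List.takeWhile_cons_of_neg (by simp [hh]), filtJoin_cons,
            parse_dropWhile, join_empty_eq_strConcat]
          simp only [strConcat, emitRec, String.append_empty]
          split <;> simp
        · rw [if_neg (fun hA => hh ((header_iff _ hc).mp hA)), ih]
          conv_rhs => rw [parseRecords]
          rw [if_neg hh, List.takeWhile_cons_of_pos (by simp [hh])]
          simp [strConcat, String.append_assoc]

-- ===== VERDICT (by name: the statement is the Claim_ definition above) =====
theorem readFastaFromString_spec : Claim_equal_readFastaFromString := by
  intro lines _
  unfold Spec_readFastaFromString readFastaFromString readFastaFromString_alt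
  rw [main_invariant]
  simp [emitRec, filtJoin]
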